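-- pv_equiv track=rewrite | github.com/intellistream/AllianceDB | scripts/drawTupleDistribution/drawTogether.py | accumulatedCnt
-- ===== SOURCE A (Python) =====
-- def accumulatedCnt(key, keyVec, timeVec):
--     cnt = 0
--     ruTime = []
--     ruCnt = []
--     for i in range(len(timeVec)):
--         if (keyVec[i] == key):
--             cnt = cnt + 1
--             ruTime.append(timeVec[i])
--             ruCnt.append(cnt)
--     return ruTime, ruCnt
-- ===== SOURCE B (Python) =====
-- def accumulatedCnt(key, keyVec, timeVec):
--     groups = {}
--     for i in range(len(timeVec)):
--         groups.setdefault(keyVec[i], []).append(timeVec[i])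
--     ruTime = groups.get(key, [])
--     ruCnt = list(range(1, len(ruTime) + 1))
--     return ruTime, ruCnt
-- ===== Notes on version B (the rewrite author's own statement) =====
-- stated objective: alternative
-- what changed: B builds a grouping dict mapping every key to its list of times via setdefault in one pass, then answers by a single dict lookup plus a closed-form range(1,len+1) for the counts, instead of A's single-key filter loop threading a counter.
import Mathlib
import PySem

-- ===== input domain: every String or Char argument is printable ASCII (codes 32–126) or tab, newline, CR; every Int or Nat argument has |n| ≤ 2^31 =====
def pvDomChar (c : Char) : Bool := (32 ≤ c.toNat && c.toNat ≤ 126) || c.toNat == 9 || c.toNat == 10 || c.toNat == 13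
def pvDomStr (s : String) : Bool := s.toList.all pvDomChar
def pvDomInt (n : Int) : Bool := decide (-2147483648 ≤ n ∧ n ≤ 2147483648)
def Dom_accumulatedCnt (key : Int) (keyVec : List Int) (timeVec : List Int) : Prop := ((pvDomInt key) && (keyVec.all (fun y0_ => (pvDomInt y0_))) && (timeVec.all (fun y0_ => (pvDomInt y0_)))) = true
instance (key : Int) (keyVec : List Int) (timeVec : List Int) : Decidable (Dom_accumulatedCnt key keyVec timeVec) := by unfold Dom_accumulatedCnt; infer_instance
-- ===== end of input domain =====

-- B groups all times by key into a dict in one pass and answers by a single lookup plus range(1,len+1) (objective: alternative).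


-- ===== PORT A =====
-- loop over i in range(len(timeVec)) threading state (cnt, ruTime, ruCnt)
def accumulatedCnt (key : Int) (keyVec : List Int) (timeVec : List Int) : List Int × List Int :=
  let st := (PySem.List.pyRange 0 (timeVec.length : Int) 1).foldl
    (fun (s : Int × List Int × List Int) i =>
      if PySem.List.pyGetD keyVec i 0 == key then
        (s.1 + 1, s.2.1 ++ [PySem.List.pyGetD timeVec i 0], s.2.2 ++ [s.1 + 1])
      else s)
    (0, [], [])
  (st.2.1, st.2.2)

-- ===== PORT B =====
-- groups = {}; for i in range(len(timeVec)): groups.setdefault(keyVec[i], []).append(timeVec[i])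
-- ruTime = groups.get(key, []); ruCnt = list(range(1, len(ruTime)+1))
def accumulatedCnt_alt (key : Int) (keyVec : List Int) (timeVec : List Int) : List Int × List Int :=
  let groups := (PySem.List.pyRange 0 (timeVec.length : Int) 1).foldl
    (fun (d : PySem.Dict Int (List Int)) i =>
      d.modify (PySem.List.pyGetD keyVec i 0) [] (· ++ [PySem.List.pyGetD timeVec i 0]))
    PySem.Dict.empty
  let ruTime := groups.getD key []
  (ruTime, PySem.List.pyRange 1 ((ruTime.length : Int) + 1) 1)

-- ===== PRECONDITION & SPEC =====
-- Pre_ excludes exactly the inputs where keyVec is shorter than timeVec: there both A and B raise IndexError.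
def Pre_accumulatedCnt (key : Int) (keyVec : List Int) (timeVec : List Int) : Prop :=
  timeVec.length ≤ keyVec.length
instance (key : Int) (keyVec : List Int) (timeVec : List Int) : Decidable (Pre_accumulatedCnt key keyVec timeVec) := by unfold Pre_accumulatedCnt; infer_instance
def pvWitness_accumulatedCnt : Int × List Int × List Int := (1, [1, 2, 1], [10, 20, 30])
def Spec_accumulatedCnt (key : Int) (keyVec : List Int) (timeVec : List Int) (out : List Int × List Int) : Prop := out = accumulatedCnt_alt key keyVec timeVec
instance (key : Int) (keyVec : List Int) (timeVec : List Int) (out : List Int × List Int) : Decidable (Spec_accumulatedCnt key keyVec timeVec out) := by unfold Spec_accumulatedCnt; infer_instance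

-- ===== CLAIM (what is proved, stated in full; the proofs are below) =====
def Claim_equal_accumulatedCnt : Prop := ∀ (key : Int) (keyVec : List Int) (timeVec : List Int), Dom_accumulatedCnt key keyVec timeVec → Pre_accumulatedCnt key keyVec timeVec → Spec_accumulatedCnt key keyVec timeVec (accumulatedCnt key keyVec timeVec)

-- ===== LEMMAS AND PROOFS =====
-- Invariant for A's loop: starting from any state (c, ts, cs), the fold appends the
-- filtered-and-mapped elements to ts and the counts c+1, c+2, … to cs.
lemma accA_loop_inv (p : Int → Bool) (g : Int → Int) :
    ∀ (L : List Int) (c : Int) (ts cs : List Int),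
      L.foldl
        (fun (s : Int × List Int × List Int) i =>
          if p i then (s.1 + 1, s.2.1 ++ [g i], s.2.2 ++ [s.1 + 1]) else s)
        (c, ts, cs)
      = (c + ((L.filter p).length : Int),
         ts ++ (L.filter p).map g,
         cs ++ (List.range (L.filter p).length).map (fun (j : ℕ) => c + 1 + (j : Int))) := by
  intro L
  induction L with
  | nil => intro c ts cs; simp
  | cons i L ih =>
    intro c ts cs
    by_cases hp : p i
    · simp only [List.foldl_cons, List.filter_cons, hp, if_true]
      rw [ih (c + 1) (ts ++ [g i]) (cs ++ [c + 1])]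
      refine Prod.ext ?_ (Prod.ext ?_ ?_)
      · simp; ring
      · simp
      · simp only [List.length_cons, List.range_succ_eq_map, List.map_cons, List.map_map,
          List.append_assoc, List.cons_append, List.nil_append]
        congr 1
        congr 1
        · push_cast; ring
        · apply List.map_congr_left; intro j _; simp; ring
    · simp only [List.foldl_cons, List.filter_cons, hp, Bool.false_eq_true, if_false]
      exact ih c ts cs

-- B's grouping loop, read at one key: fold over indices = fold over (key, time) pairs,
-- and the dict's entry at `key` is the filtered-and-mapped list.
lemma accB_group_eq (key : Int) (k g : Int → Int) (L : List Int) :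
    (L.foldl (fun (d : PySem.Dict Int (List Int)) i => d.modify (k i) [] (· ++ [g i]))
        PySem.Dict.empty).getD key []
    = (L.filter (fun i => k i == key)).map g := by
  have h : (L.foldl (fun (d : PySem.Dict Int (List Int)) i => d.modify (k i) [] (· ++ [g i]))
        PySem.Dict.empty)
      = (L.map (fun i => (k i, g i))).foldl
          (fun (d : PySem.Dict Int (List Int)) p => d.modify p.1 [] (· ++ [p.2]))
          PySem.Dict.empty := by
    rw [List.foldl_map]
  rw [h, PySem.Dict.getD_foldl_modify_append, PySem.Dict.getD_empty]
  rw [List.filter_map, List.map_map]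
  rfl

lemma pyRange_one_succ_map (m : ℕ) :
    PySem.List.pyRange 1 ((m : Int) + 1) 1 = (List.range m).map (fun (j : ℕ) => 1 + (j : Int)) := by
  rw [PySem.List.pyRange_one]
  have : ((m : Int) + 1 - 1).toNat = m := by omega
  rw [this]

-- ===== VERDICT (by name: the statement is the Claim_ definition above) =====
theorem accumulatedCnt_spec : Claim_equal_accumulatedCnt := by
  intro key keyVec timeVec _ _
  unfold Spec_accumulatedCnt accumulatedCnt accumulatedCnt_alt
  rw [accA_loop_inv (fun i => PySem.List.pyGetD keyVec i 0 == key)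
      (fun i => PySem.List.pyGetD timeVec i 0) _ 0 [] []]
  simp only [accB_group_eq key (fun i => PySem.List.pyGetD keyVec i 0)
      (fun i => PySem.List.pyGetD timeVec i 0),
    List.nil_append, List.length_map, pyRange_one_succ_map]
  refine Prod.ext rfl ?_
  apply List.map_congr_left
  intro j _
  simp
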